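-- pv_equiv track=rewrite | github.com/ntropy-unc/CTF-Files | 2020-03-08-utctf/ECB/solve.py | same_block
-- ===== SOURCE A (Python) =====
-- def same_block(data):
--     m = set()
--     for x in range(0, len(data), 16):
--         t = data[x:x + 16]
--         if t in m:
--             return True
--         m.add(t)
--     return False
-- ===== SOURCE B (Python) =====
-- def same_block(data):
--     blocks = [data[i:i + 16] for i in range(0, len(data), 16)]
--     while blocks:
--         head = blocks.pop(0)
--         if head in blocks:
--             return True
--     return False
-- ===== Notes on version B (the rewrite author's own statement) =====
-- stated objective: alternative
-- what changed: Drops A's seen-set accumulation: B chunks the data once, then repeatedly pops the first block and compares it against the remaining blocks (pairwise forward scan, no set).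
import Mathlib
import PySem

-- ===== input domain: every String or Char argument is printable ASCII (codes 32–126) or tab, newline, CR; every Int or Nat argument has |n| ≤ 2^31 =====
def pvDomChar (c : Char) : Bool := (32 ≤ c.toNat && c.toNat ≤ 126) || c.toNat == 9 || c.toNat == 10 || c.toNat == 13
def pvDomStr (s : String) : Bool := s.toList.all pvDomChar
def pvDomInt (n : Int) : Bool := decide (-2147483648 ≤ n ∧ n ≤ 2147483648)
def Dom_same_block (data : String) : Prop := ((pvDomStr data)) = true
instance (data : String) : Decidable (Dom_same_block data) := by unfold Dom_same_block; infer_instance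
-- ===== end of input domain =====

-- B drops A's seen-set: it chunks the data once, then repeatedly pops the first block and
-- compares it with the remaining blocks (pairwise forward scan, no auxiliary set); same result.

-- ===== PORT A =====
-- A's loop: for x in range(0, len(data), 16): t = data[x:x+16]; if t in m: return True; m.add(t)
def sbLoop (l : List Char) : List Int → PySem.Set (List Char) → Bool
  | [], _ => false
  | x :: rest, m =>
      let t := PySem.List.slice l (some x) (some (x + 16))
      if PySem.Set.contains m t then true
      else sbLoop l rest (PySem.Set.add m t)

def same_block (data : String) : Bool :=
  sbLoop data.toList (PySem.List.pyRange 0 (data.toList.length : Int) 16) PySem.Set.empty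

-- ===== PORT B =====
-- B's loop: while blocks: head = blocks.pop(0); if head in blocks: return True
def sbPop : List (List Char) → Bool
  | [] => false
  | head :: rest => if head ∈ rest then true else sbPop rest

def same_block_alt (data : String) : Bool :=
  let l := data.toList
  let blocks := (PySem.List.pyRange 0 (l.length : Int) 16).map
      (fun i => PySem.List.slice l (some i) (some (i + 16)))
  sbPop blocks

-- ===== PRECONDITION & SPEC =====
def Spec_same_block (data : String) (out : Bool) : Prop := out = same_block_alt data
instance (data : String) (out : Bool) : Decidable (Spec_same_block data out) := by unfold Spec_same_block; infer_instance

-- ===== CLAIM (what is proved, stated in full; the proofs are below) =====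
def Claim_equal_same_block : Prop := ∀ (data : String), Dom_same_block data → Spec_same_block data (same_block data)

-- ===== LEMMAS AND PROOFS =====

lemma sbAdd_eq (s : PySem.Set (List Char)) (x : List Char) :
    PySem.Set.add s x = if x ∈ s then s else s ++ [x] := by
  simp [PySem.Set.add]

lemma sbLoop_eq (l : List Char) (idxs : List Int) :
    ∀ m : PySem.Set (List Char), m.Nodup →
      sbLoop l idxs m =
        decide (¬ (m ++ idxs.map (fun i => PySem.List.slice l (some i) (some (i + 16)))).Nodup) := by
  induction idxs with
  | nil => intro m hm; simp [sbLoop, hm]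
  | cons x rest ih =>
      intro m hm
      simp only [sbLoop, List.map_cons]
      by_cases hx : PySem.List.slice l (some x) (some (x + 16)) ∈ m
      · rw [if_pos (by simpa [PySem.Set.contains_iff] using hx)]
        have hnd : ¬ (m ++ PySem.List.slice l (some x) (some (x + 16)) ::
            rest.map (fun i => PySem.List.slice l (some i) (some (i + 16)))).Nodup := by
          intro h
          exact (List.disjoint_of_nodup_append h) hx (by simp)
        simp [hnd]
      · rw [if_neg (by simpa [PySem.Set.contains_iff] using hx)]
        have hns : (PySem.Set.add m (PySem.List.slice l (some x) (some (x + 16)))).Nodup := by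
          rw [sbAdd_eq, if_neg hx]
          rw [List.nodup_append]
          refine ⟨hm, List.nodup_singleton _, ?_⟩
          intro a ha b hb hab
          rw [List.mem_singleton] at hb
          exact hx ((hab.trans hb) ▸ ha)
        rw [ih _ hns, sbAdd_eq, if_neg hx, List.append_assoc, List.singleton_append]
        exact decide_eq_decide.mpr Iff.rfl

lemma sbPop_eq (xs : List (List Char)) : sbPop xs = decide (¬ xs.Nodup) := by
  induction xs with
  | nil => simp [sbPop]
  | cons x rest ih =>
      by_cases hx : x ∈ rest
      · simp [sbPop, hx]
      · simp [sbPop, hx, ih]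

-- ===== VERDICT (by name: the statement is the Claim_ definition above) =====
theorem same_block_spec : Claim_equal_same_block := by
  intro data _
  show sbLoop data.toList (PySem.List.pyRange 0 (data.toList.length : Int) 16) PySem.Set.empty =
      sbPop ((PySem.List.pyRange 0 (data.toList.length : Int) 16).map
        (fun i => PySem.List.slice data.toList (some i) (some (i + 16))))
  rw [sbLoop_eq data.toList _ PySem.Set.empty List.nodup_nil, sbPop_eq]
  rw [show (PySem.Set.empty : PySem.Set (List Char)) = [] from rfl, List.nil_append]
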